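-- pv_equiv track=rewrite | github.com/KokorinIlya/ITMO-bioinformatics | py-bioinf/task_5.py | genome_to_cycle
-- ===== SOURCE A (Python) =====
-- def chromosome_to_cycle(chromosome):
--     result = []
--     for x in chromosome:
--         assert x != 0
--         if x > 0:
--             node_from = 2 * x - 1
--             node_to = 2 * x
--         else:
--             x = abs(x)
--             node_from = 2 * x
--             node_to = 2 * x - 1
--         result.append(node_from)
--         result.append(node_to)
--     return result
--
-- def genome_to_cycle(genome):
--     result = {}
--     for cur_chromosome in genome:
--         cur_cycle = chromosome_to_cycle(cur_chromosome)
--         assert len(cur_cycle) >= 2 and len(cur_cycle) % 2 == 0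
--
--         v = cur_cycle[0]
--         u = cur_cycle[-1]
--         assert v not in result and u not in result
--         result[v] = u
--         result[u] = v
--
--         for i in range(len(cur_cycle) // 2 - 1):
--             v = cur_cycle[2 * i + 1]
--             u = cur_cycle[2 * i + 2]
--             assert v not in result and u not in result
--             result[v] = u
--             result[u] = v
--
--     return result
-- ===== SOURCE B (Python) =====
-- def genome_to_cycle(genome):
--     def head(g):
--         assert g != 0
--         return 2 * g - 1 if g > 0 else -2 * g
--
--     def tail(g):
--         assert g != 0
--         return 2 * g if g > 0 else -2 * g - 1
--
--     def edges(prev, rest):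
--         if not rest:
--             return []
--         cur = rest[0]
--         return [(tail(prev), head(cur)), (head(cur), tail(prev))] + edges(cur, rest[1:])
--
--     pairs = []
--     for chrom in genome:
--         assert chrom
--         pairs += [(head(chrom[0]), tail(chrom[-1])), (tail(chrom[-1]), head(chrom[0]))]
--         pairs += edges(chrom[0], chrom[1:])
--     return dict(pairs)
-- ===== Notes on version B (the rewrite author's own statement) =====
-- stated objective: alternative
-- what changed: B discards A's flattened node-cycle list, index loop and mutating dict with membership asserts: it builds each chromosome's edge list by pure structural recursion over the gene list (closing pair first, then recursing over adjacent genes) and materializes the dict once at the end with dict(pairs).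
import Mathlib
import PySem

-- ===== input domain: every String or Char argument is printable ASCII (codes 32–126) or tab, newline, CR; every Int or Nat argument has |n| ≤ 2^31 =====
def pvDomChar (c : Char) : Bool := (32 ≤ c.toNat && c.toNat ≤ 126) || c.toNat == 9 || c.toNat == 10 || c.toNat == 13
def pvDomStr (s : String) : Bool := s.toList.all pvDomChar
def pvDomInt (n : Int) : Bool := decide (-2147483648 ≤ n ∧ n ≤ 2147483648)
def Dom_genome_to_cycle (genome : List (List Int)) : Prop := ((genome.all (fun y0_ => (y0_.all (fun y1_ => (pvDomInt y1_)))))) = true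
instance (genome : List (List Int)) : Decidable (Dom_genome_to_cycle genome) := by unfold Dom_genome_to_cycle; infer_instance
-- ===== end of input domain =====

-- B builds each chromosome's edge list by pure structural recursion (no node-cycle list, no index
-- arithmetic, no mutating dict with membership asserts) and makes the dict once at the end.

-- ===== PORT A =====
def chromosome_to_cycle (chromosome : List Int) : List Int :=
  chromosome.foldl (fun result x =>
    if x > 0 then
      result ++ [2 * x - 1, 2 * x]
    else
      let a := |x|
      result ++ [2 * a, 2 * a - 1]) []

def genome_to_cycle (genome : List (List Int)) : List (Int × Int) :=
  (genome.foldl (fun (result : PySem.Dict Int Int) cur_chromosome =>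
    let cur_cycle := chromosome_to_cycle cur_chromosome
    let v := (PySem.List.pyGet? cur_cycle 0).getD 0
    let u := (PySem.List.pyGet? cur_cycle (-1)).getD 0
    let result := (result.insert v u).insert u v
    (PySem.List.pyRange 0 (PySem.Int.floordiv (cur_cycle.length : Int) 2 - 1) 1).foldl
      (fun result i =>
        let v := (PySem.List.pyGet? cur_cycle (2 * i + 1)).getD 0
        let u := (PySem.List.pyGet? cur_cycle (2 * i + 2)).getD 0
        (result.insert v u).insert u v) result) PySem.Dict.empty).items

-- ===== PORT B =====
def pvHead (g : Int) : Int := if g > 0 then 2 * g - 1 else -2 * g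
def pvTail (g : Int) : Int := if g > 0 then 2 * g else -2 * g - 1

def pvEdges (prev : Int) (rest : List Int) : List (Int × Int) :=
  match rest with
  | [] => []
  | cur :: rs => [(pvTail prev, pvHead cur), (pvHead cur, pvTail prev)] ++ pvEdges cur rs

def genome_to_cycle_alt (genome : List (List Int)) : List (Int × Int) :=
  let pairs := genome.foldl (fun pairs chrom =>
    let h0 := pvHead ((PySem.List.pyGet? chrom 0).getD 0)
    let tl := pvTail ((PySem.List.pyGet? chrom (-1)).getD 0)
    pairs ++ [(h0, tl), (tl, h0)] ++ pvEdges ((PySem.List.pyGet? chrom 0).getD 0) chrom.tail) []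
  (pairs.foldl (fun (d : PySem.Dict Int Int) p => d.insert p.1 p.2) PySem.Dict.empty).items

-- ===== PRECONDITION & SPEC =====
-- Pre_ is exactly where Python A returns: every chromosome nonempty, every gene nonzero, and all
-- gene magnitudes distinct across the genome (otherwise one of A's assert statements raises).
def Pre_genome_to_cycle (genome : List (List Int)) : Prop :=
  (∀ c ∈ genome, c ≠ [] ∧ ∀ x ∈ c, x ≠ 0) ∧
  ((genome.flatMap id).map Int.natAbs).Nodup
instance (genome : List (List Int)) : Decidable (Pre_genome_to_cycle genome) := by
  unfold Pre_genome_to_cycle; infer_instance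

def pvWitness_genome_to_cycle : List (List Int) := [[1, -2], [3]]

def Spec_genome_to_cycle (genome : List (List Int)) (out : List (Int × Int)) : Prop := out = genome_to_cycle_alt genome
instance (genome : List (List Int)) (out : List (Int × Int)) : Decidable (Spec_genome_to_cycle genome out) := by unfold Spec_genome_to_cycle; infer_instance

-- ===== CLAIM (what is proved, stated in full; the proofs are below) =====
def Claim_equal_genome_to_cycle : Prop := ∀ (genome : List (List Int)), Dom_genome_to_cycle genome → Pre_genome_to_cycle genome → Spec_genome_to_cycle genome (genome_to_cycle genome)

-- ===== LEMMAS AND PROOFS =====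

-- proof-only helpers: a gene's two endpoints as a pair, and a symmetric double insert
def pvEnds (x : Int) : Int × Int :=
  if x > 0 then (2 * x - 1, 2 * x) else (-2 * x, -2 * x - 1)

def pvLink (r : PySem.Dict Int Int) (a b : Int) : PySem.Dict Int Int :=
  (r.insert a b).insert b a

lemma pv_ends_eq (x : Int) : pvEnds x = (pvHead x, pvTail x) := by
  unfold pvEnds pvHead pvTail; split_ifs <;> rfl

lemma pv_cycle_eq_flatMap (c : List Int) :
    chromosome_to_cycle c = c.flatMap (fun x => [(pvEnds x).1, (pvEnds x).2]) := by
  have aux : ∀ (c : List Int) (acc : List Int),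
      c.foldl (fun result x =>
        if x > 0 then result ++ [2 * x - 1, 2 * x]
        else
          let a := |x|
          result ++ [2 * a, 2 * a - 1]) acc
      = acc ++ c.flatMap (fun x => [(pvEnds x).1, (pvEnds x).2]) := by
    intro c
    induction c with
    | nil => simp
    | cons x xs ih =>
      intro acc
      simp only [List.foldl_cons, List.flatMap_cons, ih]
      by_cases hx : x > 0
      · simp [pvEnds, hx]
      · have : |x| = -x := abs_of_nonpos (by omega)
        simp [pvEnds, hx, this]
  simpa using aux c []

lemma pv_length_cycle (c : List Int) :
    (chromosome_to_cycle c).length = 2 * c.length := by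
  rw [pv_cycle_eq_flatMap]
  induction c with
  | nil => simp
  | cons x xs ih => simp [ih]; omega

lemma pv_getLast?_cycle (c : List Int) :
    (chromosome_to_cycle c).getLast? = c.getLast?.map (fun x => (pvEnds x).2) := by
  rw [pv_cycle_eq_flatMap]
  induction c with
  | nil => simp
  | cons x xs ih =>
    cases xs with
    | nil => simp
    | cons y ys =>
      simp only [List.flatMap_cons] at ih ⊢
      rw [List.getLast?_append_of_ne_nil _ (by simp)]
      rw [ih]
      simp

lemma pv_zip_snoc (c : List Int) (y z : Int) (hz : c.getLast? = some z) :
    (c ++ [y]).zip ((c ++ [y]).tail) = c.zip c.tail ++ [(z, y)] := by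
  induction c with
  | nil => simp at hz
  | cons a t ih =>
    cases t with
    | nil => simp at hz; simp [hz, List.zip]
    | cons b u =>
      have hz' : (b :: u).getLast? = some z := by
        rw [List.getLast?_cons_cons] at hz; exact hz
      have := ih hz'
      simp only [List.cons_append, List.tail_cons, List.zip_cons_cons] at this ⊢
      rw [this]

-- the inner loops: A's index loop over the cycle list = a fold over adjacent gene pairs
lemma pv_loop_eq (c : List Int) (r : PySem.Dict Int Int) :
    (PySem.List.pyRange 0 ((c.length : Int) - 1) 1).foldl
      (fun result i =>
        let v := (PySem.List.pyGet? (chromosome_to_cycle c) (2 * i + 1)).getD 0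
        let u := (PySem.List.pyGet? (chromosome_to_cycle c) (2 * i + 2)).getD 0
        (result.insert v u).insert u v) r
    = (c.zip c.tail).foldl (fun r gh => pvLink r (pvEnds gh.1).2 (pvEnds gh.2).1) r := by
  induction c using List.reverseRecOn generalizing r with
  | nil =>
    rw [PySem.List.pyRange_one_eq_nil (by norm_num)]
    simp
  | append_singleton c y ih =>
    by_cases hcne : c = []
    · subst hcne
      rw [PySem.List.pyRange_one_eq_nil (by norm_num)]
      simp
    · obtain ⟨z, hz⟩ : ∃ z, c.getLast? = some z := by
        cases h : c.getLast? with
        | none => exact absurd (List.getLast?_eq_none_iff.mp h) hcne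
        | some z => exact ⟨z, rfl⟩
      have hn : 1 ≤ c.length := List.length_pos_of_ne_nil hcne
      have hcyc : chromosome_to_cycle (c ++ [y])
          = chromosome_to_cycle c ++ [(pvEnds y).1, (pvEnds y).2] := by
        simp [pv_cycle_eq_flatMap]
      have hlen : (chromosome_to_cycle c).length = 2 * c.length := pv_length_cycle c
      have hrange : PySem.List.pyRange 0 (((c ++ [y]).length : Int) - 1) 1
          = PySem.List.pyRange 0 ((c.length : Int) - 1) 1 ++ [((c.length : Int) - 1)] := by
        have : (((c ++ [y]).length : Int) - 1) = ((c.length : Int) - 1) + 1 := by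
          simp
        rw [this, PySem.List.pyRange_one_succ_right (by omega)]
      rw [hrange, List.foldl_append]
      have hcongr : (PySem.List.pyRange 0 ((c.length : Int) - 1) 1).foldl
          (fun result i =>
            let v := (PySem.List.pyGet? (chromosome_to_cycle (c ++ [y])) (2 * i + 1)).getD 0
            let u := (PySem.List.pyGet? (chromosome_to_cycle (c ++ [y])) (2 * i + 2)).getD 0
            (result.insert v u).insert u v) r
          = (PySem.List.pyRange 0 ((c.length : Int) - 1) 1).foldl
          (fun result i =>
            let v := (PySem.List.pyGet? (chromosome_to_cycle c) (2 * i + 1)).getD 0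
            let u := (PySem.List.pyGet? (chromosome_to_cycle c) (2 * i + 2)).getD 0
            (result.insert v u).insert u v) r := by
        apply PySem.List.foldl_congr_mem
        intro acc i hi
        rw [PySem.List.mem_pyRange_one] at hi
        have h1 : PySem.List.pyGet? (chromosome_to_cycle (c ++ [y])) (2 * i + 1)
            = PySem.List.pyGet? (chromosome_to_cycle c) (2 * i + 1) := by
          rw [hcyc,
            PySem.List.pyGet?_of_nonneg (chromosome_to_cycle c ++ [(pvEnds y).1, (pvEnds y).2]) (by omega),
            PySem.List.pyGet?_of_nonneg (chromosome_to_cycle c) (by omega),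
            List.getElem?_append_left (by omega)]
        have h2 : PySem.List.pyGet? (chromosome_to_cycle (c ++ [y])) (2 * i + 2)
            = PySem.List.pyGet? (chromosome_to_cycle c) (2 * i + 2) := by
          rw [hcyc,
            PySem.List.pyGet?_of_nonneg (chromosome_to_cycle c ++ [(pvEnds y).1, (pvEnds y).2]) (by omega),
            PySem.List.pyGet?_of_nonneg (chromosome_to_cycle c) (by omega),
            List.getElem?_append_left (by omega)]
        simp only [h1, h2]
      rw [hcongr, ih]
      have hlast1 : PySem.List.pyGet? (chromosome_to_cycle (c ++ [y])) (2 * ((c.length : Int) - 1) + 1)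
          = some ((pvEnds z).2) := by
        rw [hcyc, PySem.List.pyGet?_of_nonneg _ (by omega)]
        rw [List.getElem?_append_left (by omega)]
        have hidx : (2 * ((c.length : Int) - 1) + 1).toNat = (chromosome_to_cycle c).length - 1 := by
          omega
        rw [hidx, ← List.getLast?_eq_getElem?, pv_getLast?_cycle, hz]
        rfl
      have hlast2 : PySem.List.pyGet? (chromosome_to_cycle (c ++ [y])) (2 * ((c.length : Int) - 1) + 2)
          = some ((pvEnds y).1) := by
        rw [hcyc]
        have hidx : 2 * ((c.length : Int) - 1) + 2 = ((chromosome_to_cycle c).length : Int) := by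
          omega
        rw [hidx]
        exact PySem.List.pyGet?_append_length (chromosome_to_cycle c) [(pvEnds y).2] ((pvEnds y).1)
      rw [pv_zip_snoc c y z hz, List.foldl_append]
      simp only [List.foldl_cons, List.foldl_nil, hlast1, hlast2, Option.getD_some]
      rfl

-- folding single inserts over B's recursive edge list = the zip fold of symmetric links
lemma pv_edges_foldl (xs : List Int) (x : Int) (r : PySem.Dict Int Int) :
    (pvEdges x xs).foldl (fun (d : PySem.Dict Int Int) p => d.insert p.1 p.2) r
    = ((x :: xs).zip xs).foldl (fun r gh => pvLink r (pvEnds gh.1).2 (pvEnds gh.2).1) r := by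
  induction xs generalizing x r with
  | nil => rfl
  | cons y ys ih =>
    simp only [pvEdges, List.cons_append, List.nil_append, List.foldl_cons,
      List.zip_cons_cons]
    rw [ih]
    simp [pvLink, pv_ends_eq]

-- A's per-chromosome body = folding single inserts over B's per-chromosome pair list
lemma pv_body_eq (c : List Int) (hne : c ≠ []) (r : PySem.Dict Int Int) :
    (let cur_cycle := chromosome_to_cycle c
     let v := (PySem.List.pyGet? cur_cycle 0).getD 0
     let u := (PySem.List.pyGet? cur_cycle (-1)).getD 0
     let result := (r.insert v u).insert u v
     (PySem.List.pyRange 0 (PySem.Int.floordiv (cur_cycle.length : Int) 2 - 1) 1).foldl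
       (fun result i =>
         let v := (PySem.List.pyGet? cur_cycle (2 * i + 1)).getD 0
         let u := (PySem.List.pyGet? cur_cycle (2 * i + 2)).getD 0
         (result.insert v u).insert u v) result)
    = (let h0 := pvHead ((PySem.List.pyGet? c 0).getD 0)
       let tl := pvTail ((PySem.List.pyGet? c (-1)).getD 0)
       ([(h0, tl), (tl, h0)] ++ pvEdges ((PySem.List.pyGet? c 0).getD 0) c.tail).foldl
         (fun (d : PySem.Dict Int Int) p => d.insert p.1 p.2) r) := by
  obtain ⟨x, xs, rfl⟩ := List.exists_cons_of_ne_nil hne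
  obtain ⟨z, hz⟩ : ∃ z, (x :: xs).getLast? = some z := by
    cases h : (x :: xs).getLast? with
    | none => simp at h
    | some z => exact ⟨z, rfl⟩
  have hhead : PySem.List.pyGet? (chromosome_to_cycle (x :: xs)) 0 = some ((pvEnds x).1) := by
    rw [pv_cycle_eq_flatMap]
    simp [PySem.List.pyGet?_zero_cons]
  have hlast : PySem.List.pyGet? (chromosome_to_cycle (x :: xs)) (-1) = some ((pvEnds z).2) := by
    rw [PySem.List.pyGet?_neg_one, pv_getLast?_cycle, hz]
    rfl
  have hbhead : PySem.List.pyGet? (x :: xs) 0 = some x := PySem.List.pyGet?_zero_cons x xs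
  have hblast : PySem.List.pyGet? (x :: xs) (-1) = some z := by
    rw [PySem.List.pyGet?_neg_one]; exact hz
  have hdiv : PySem.Int.floordiv (((chromosome_to_cycle (x :: xs)).length : Int)) 2 - 1
      = (((x :: xs).length : Int) - 1) := by
    rw [pv_length_cycle]
    rw [PySem.Int.floordiv_eq_ediv_of_pos (by norm_num)]
    push_cast
    omega
  simp only [hhead, hlast, hbhead, hblast, Option.getD_some, hdiv]
  rw [pv_loop_eq]
  simp only [List.cons_append, List.nil_append, List.foldl_cons]
  rw [pv_edges_foldl]
  simp [pv_ends_eq, List.tail_cons]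

-- folding inserts over the concatenated pair lists = folding A's per-chromosome bodies
lemma pv_concat_fold (genome : List (List Int)) (acc : List (Int × Int))
    (d : PySem.Dict Int Int)
    (P : List Int → List (Int × Int)) :
    ((genome.foldl (fun pairs chrom => pairs ++ P chrom) acc).foldl
      (fun (d : PySem.Dict Int Int) p => d.insert p.1 p.2) d)
    = genome.foldl (fun d chrom => (P chrom).foldl
        (fun (d : PySem.Dict Int Int) p => d.insert p.1 p.2) d)
      (acc.foldl (fun (d : PySem.Dict Int Int) p => d.insert p.1 p.2) d) := by
  induction genome generalizing acc d with
  | nil => rfl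
  | cons c cs ih =>
    simp only [List.foldl_cons]
    rw [ih, List.foldl_append]

-- ===== VERDICT (by name: the statement is the Claim_ definition above) =====
theorem genome_to_cycle_spec : Claim_equal_genome_to_cycle := by
  intro genome _ hpre
  unfold Spec_genome_to_cycle genome_to_cycle genome_to_cycle_alt
  simp only [List.append_assoc]
  rw [pv_concat_fold genome [] PySem.Dict.empty
    (fun chrom =>
      [(pvHead ((PySem.List.pyGet? chrom 0).getD 0), pvTail ((PySem.List.pyGet? chrom (-1)).getD 0)),
       (pvTail ((PySem.List.pyGet? chrom (-1)).getD 0), pvHead ((PySem.List.pyGet? chrom 0).getD 0))] ++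
      pvEdges ((PySem.List.pyGet? chrom 0).getD 0) chrom.tail)]
  congr 1
  apply PySem.List.foldl_congr_mem
  intro acc c hc
  exact pv_body_eq c (hpre.1 c hc).1 acc
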